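-- pv_equiv track=rewrite | github.com/suwampy/py-algorithm | 백준/탐욕법/20300_서강근육맨.py | solution
-- ===== SOURCE A (Python) =====
-- from collections import deque
--
-- def solution(priorities, location):
--
--     deq = deque([(p, i) for (i, p) in enumerate(priorities)])  # 인덱스 묶어줌
--     answer = 0  # 인쇄가 완료된 문서 개수
--
--     while deq:
--         target = deq.popleft()  # 맨앞에 있는 요소 빼내기
--
--         if deq and max(deq)[0] > target[0]:  # 뒤에 최고우선순위가 있다면
--             deq.append(target)  # 맨 뒤로보내기
--
--         else:
--             answer += 1  # 최고 우선순위라면 문서 인쇄됨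
--             if target[1] == location:  # 현재 target의 인덱스가 내가 요청한문서 위치(location)라면
--                 break
--
--     return answer
-- ===== SOURCE B (Python) =====
-- def solution(priorities, location):
--     # Select the next printed document directly: the first maximum-priority document
--     # in cyclic scan order starting just after the previously printed one.
--     rem = list(range(len(priorities)))  # remaining documents, in original order
--     cur = 0                             # scan resumes here
--     ans = 0
--     while rem:
--         order = list(range(cur, len(rem))) + list(range(cur))
--         best = order[0]
--         for k in order[1:]:
--             if priorities[rem[k]] > priorities[rem[best]]:
--                 best = k
--         ans += 1
--         if rem[best] == location:
--             return ans
--         del rem[best]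
--         cur = best if best < len(rem) else 0
--     return ans
-- ===== Notes on version B (the rewrite author's own statement) =====
-- stated objective: faster
-- what changed: Replaces the rotating deque of (priority,index) pairs with a per-step max scan by direct selection: keep the remaining documents in original order with a cyclic cursor and, once per print, pick the first maximum-priority document in cyclic scan order, so the one-element-at-a-time requeue rotations disappear.
import Mathlib
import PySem

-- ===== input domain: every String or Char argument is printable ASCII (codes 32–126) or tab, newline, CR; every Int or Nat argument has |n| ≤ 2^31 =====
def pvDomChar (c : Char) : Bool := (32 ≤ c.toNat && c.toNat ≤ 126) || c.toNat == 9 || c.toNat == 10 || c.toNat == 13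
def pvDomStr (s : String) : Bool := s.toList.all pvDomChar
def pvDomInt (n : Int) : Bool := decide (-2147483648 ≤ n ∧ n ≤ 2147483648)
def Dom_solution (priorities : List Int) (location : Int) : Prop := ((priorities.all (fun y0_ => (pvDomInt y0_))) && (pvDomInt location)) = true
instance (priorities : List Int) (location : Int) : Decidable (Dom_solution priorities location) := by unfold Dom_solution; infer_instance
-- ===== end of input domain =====

-- B replaces A's rotating deque (one requeue per step, with a fresh max scan each step) by
-- direct selection of the next printed document (first cyclic argmax), measured faster.

-- ===== PORT A =====
-- A-side helpers: `max(deq)` on pairs is Python's lexicographic running max.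
def pyMaxPair (a : Int × Int) (l : List (Int × Int)) : Int × Int :=
  l.foldl (fun m x => if m.1 < x.1 ∨ (m.1 = x.1 ∧ m.2 < x.2) then x else m) a

-- maximum first component (used only for the termination measure / proofs)
def maxFst : List (Int × Int) → Int
  | [] => 0
  | x :: xs => xs.foldl (fun b y => max b y.1) x.1

-- index of the first element attaining the maximal priority (termination measure)
def fmIdx (l : List (Int × Int)) : Nat := l.findIdx (fun x => x.1 == maxFst l)

theorem foldl_max_shift (l : List (Int × Int)) (a b : Int) :
    l.foldl (fun m x => max m x.1) (max a b) = max a (l.foldl (fun m x => max m x.1) b) := by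
  induction l generalizing b with
  | nil => rfl
  | cons x t ih =>
    simp only [List.foldl_cons, max_assoc]
    exact ih (max b x.1)

theorem maxFst_cons (x : Int × Int) (l : List (Int × Int)) (h : l ≠ []) :
    maxFst (x :: l) = max x.1 (maxFst l) := by
  match l with
  | y :: ys =>
    show (y :: ys).foldl (fun b p => max b p.1) x.1 = _
    simp only [List.foldl_cons]
    exact foldl_max_shift ys x.1 y.1

theorem maxFst_append_singleton (l : List (Int × Int)) (h : l ≠ []) (t : Int × Int) :
    maxFst (l ++ [t]) = max t.1 (maxFst l) := by
  match l with
  | y :: ys =>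
    show ((ys ++ [t]).foldl (fun b p => max b p.1) y.1) = _
    rw [List.foldl_append]
    simp only [List.foldl_cons, List.foldl_nil]
    rw [max_comm]
    rfl

theorem exists_fst_eq_maxFst (l : List (Int × Int)) (h : l ≠ []) :
    ∃ x ∈ l, x.1 = maxFst l := by
  induction l with
  | nil => exact absurd rfl h
  | cons x t ih =>
    cases ht : t with
    | nil => exact ⟨x, by simp, by simp [maxFst]⟩
    | cons y ys =>
      rw [← ht]
      have htne : t ≠ [] := by simp [ht]
      obtain ⟨m, hm, hmeq⟩ := ih htne
      rw [maxFst_cons x t htne]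
      rcases le_total (maxFst t) x.1 with hle | hle
      · exact ⟨x, List.mem_cons_self .., (max_eq_left hle).symm⟩
      · exact ⟨m, List.mem_cons_of_mem x hm, by rw [max_eq_right hle]; exact hmeq⟩

theorem fst_pyMaxPair (a : Int × Int) (l : List (Int × Int)) :
    (pyMaxPair a l).1 = l.foldl (fun m x => max m x.1) a.1 := by
  induction l generalizing a with
  | nil => rfl
  | cons x t ih =>
    simp only [pyMaxPair, List.foldl_cons] at *
    rw [ih]
    congr 1
    split_ifs with h
    · rcases h with h | h
      · exact (max_eq_right h.le).symm
      · rw [h.1]; exact (max_self _).symm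
    · have h1 : ¬ a.1 < x.1 := fun hc => h (Or.inl hc)
      exact (max_eq_left (not_lt.mp h1)).symm

theorem fst_pyMaxPair_eq_maxFst (r : Int × Int) (rs : List (Int × Int)) :
    (pyMaxPair r rs).1 = maxFst (r :: rs) := fst_pyMaxPair r rs

theorem fmIdx_rotate (t r : Int × Int) (rs : List (Int × Int))
    (h : maxFst (r :: rs) > t.1) :
    fmIdx ((r :: rs) ++ [t]) < fmIdx (t :: r :: rs) := by
  have hne : (r :: rs) ≠ [] := by simp
  have hM1 : maxFst (t :: r :: rs) = maxFst (r :: rs) := by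
    rw [maxFst_cons t _ hne]; exact max_eq_right (le_of_lt h)
  have hM2 : maxFst ((r :: rs) ++ [t]) = maxFst (r :: rs) := by
    rw [maxFst_append_singleton _ hne t]; exact max_eq_right (le_of_lt h)
  set M := maxFst (r :: rs) with hMdef
  obtain ⟨m, hm, hmeq⟩ := exists_fst_eq_maxFst (r :: rs) hne
  have hfound : List.findIdx (fun x => x.1 == M) (r :: rs) < (r :: rs).length :=
    List.findIdx_lt_length.mpr ⟨m, hm, by simpa using hmeq⟩
  unfold fmIdx
  rw [hM1, hM2]
  rw [List.findIdx_append, if_pos hfound]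
  conv_rhs => rw [List.findIdx_cons]
  have ht : (t.1 == M) = false := beq_eq_false_iff_ne.mpr (ne_of_lt h)
  rw [ht]
  simp only [Bool.cond_false]
  exact Nat.lt_succ_self _

def solutionLoop (location : Int) (deq : List (Int × Int)) (answer : Int) : Int :=
  match deq with
  | [] => answer
  | target :: rest =>
    match rest with
    | [] =>
      -- `deq and max(deq)[0] > target[0]` is False on an empty deque
      let answer := answer + 1
      if target.2 = location then answer else solutionLoop location [] answer
    | r :: rs =>
      if (pyMaxPair r rs).1 > target.1 then
        solutionLoop location ((r :: rs) ++ [target]) answer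
      else
        let answer := answer + 1
        if target.2 = location then answer else solutionLoop location (r :: rs) answer
termination_by (deq.length, fmIdx deq)
decreasing_by
  · exact Prod.Lex.left _ _ (by simp)
  · apply Prod.Lex.right'
    · simp
    · exact fmIdx_rotate target r rs (by rw [← fst_pyMaxPair_eq_maxFst]; assumption)
  · exact Prod.Lex.left _ _ (by simp)

def solution (priorities : List Int) (location : Int) : Int :=
  let deq := (PySem.List.enumerate priorities).map (fun ip => (ip.2, ip.1))
  solutionLoop location deq 0

-- ===== PORT B =====
-- the inner `for k in order[1:]` argmax loop of Source B
def altBestFold (priorities rem : List Int) (o0 : Int) (orest : List Int) : Int :=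
  orest.foldl (fun best k =>
    if PySem.List.pyGetD priorities (PySem.List.pyGetD rem k 0) 0 >
       PySem.List.pyGetD priorities (PySem.List.pyGetD rem best 0) 0 then k else best) o0

theorem altLoop_dec {rem : List Int} {best : Int} {doc : Int}
    (hg : PySem.List.pyGet? rem best = some doc) :
    (rem.eraseIdx ((if best < 0 then best + (rem.length : Int) else best).toNat)).length
      < rem.length := by
  have hir : PySem.Raise.InRange rem.length best := by
    by_contra hc
    rw [← PySem.List.pyGet?_eq_none_iff] at hc
    rw [hc] at hg
    exact absurd hg (by simp)
  have hir' : -(rem.length : Int) ≤ best ∧ best < (rem.length : Int) := by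
    simpa [PySem.Raise.InRange] using hir
  rw [List.length_eraseIdx]
  split_ifs <;> omega

def solutionAltLoop (priorities : List Int) (location : Int) (rem : List Int) (cur : Int)
    (ans : Int) : Int :=
  match hr : rem with
  | [] => ans
  | _ :: _ =>
    let order := PySem.List.pyRange cur (rem.length : Int) 1 ++ PySem.List.pyRange 0 cur 1
    match order with
    | [] => ans  -- Python's `order[0]` would raise IndexError; unreachable from the entry point
    | o0 :: orest =>
      -- best = order[0]; for k in order[1:]: strict-improvement argmax
      let best := altBestFold priorities rem o0 orest
      let ans := ans + 1
      match hg : PySem.List.pyGet? rem best with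
      | none => ans  -- Python's `rem[best]` would raise IndexError; unreachable from the entry point
      | some doc =>
        if doc = location then ans
        else
          -- `del rem[best]` (negative index wraps, as in Python)
          let j := (if best < 0 then best + (rem.length : Int) else best).toNat
          solutionAltLoop priorities location (rem.eraseIdx j)
            (if best < ((rem.eraseIdx j).length : Int) then best else 0) ans
termination_by rem.length
decreasing_by
  exact hr ▸ altLoop_dec hg

def solution_alt (priorities : List Int) (location : Int) : Int :=
  solutionAltLoop priorities location (PySem.List.pyRange 0 (priorities.length : Int) 1) 0 0

-- ===== PRECONDITION & SPEC =====
def Spec_solution (priorities : List Int) (location : Int) (out : Int) : Prop := out = solution_alt priorities location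
instance (priorities : List Int) (location : Int) (out : Int) : Decidable (Spec_solution priorities location out) := by unfold Spec_solution; infer_instance

-- ===== CLAIM (what is proved, stated in full; the proofs are below) =====
def Claim_equal_solution : Prop := ∀ (priorities : List Int) (location : Int), Dom_solution priorities location → Spec_solution priorities location (solution priorities location)

-- ===== LEMMAS AND PROOFS =====

theorem le_maxFst (l : List (Int × Int)) (x : Int × Int) (hx : x ∈ l) : x.1 ≤ maxFst l := by
  match l with
  | y :: ys =>
    have h := PySem.List.le_foldl_max_int ys (fun p => p.1) y.1
    rcases List.mem_cons.mp hx with rfl | hmem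
    · exact h.1
    · exact h.2 x hmem


-- B's scan key: the priority of the document rem[k]
def keyf (priorities rem : List Int) (k : Int) : Int :=
  PySem.List.pyGetD priorities (PySem.List.pyGetD rem k 0) 0

theorem altBestFold_eq (priorities rem : List Int) (o0 : Int) (orest : List Int) :
    altBestFold priorities rem o0 orest =
      orest.foldl (fun b k => if keyf priorities rem k > keyf priorities rem b then k else b) o0 :=
  rfl

-- any nonempty list splits at its first maximum of f
theorem exists_first_max_split (f : Int → Int) (l : List Int) (hl : l ≠ []) :
    ∃ P m S, l = P ++ m :: S ∧ (∀ x ∈ P, f x < f m) ∧ (∀ x ∈ l, f x ≤ f m) := by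
  induction l with
  | nil => exact absurd rfl hl
  | cons a t ih =>
    by_cases ht : t = []
    · subst ht; exact ⟨[], a, [], rfl, by simp, by simp⟩
    · obtain ⟨P, m, S, heq, hP, hall⟩ := ih ht
      by_cases ham : f m ≤ f a
      · refine ⟨[], a, t, rfl, by simp, ?_⟩
        intro x hx
        rcases List.mem_cons.mp hx with rfl | hx
        · exact le_refl _
        · exact le_trans (hall x hx) ham
      · refine ⟨a :: P, m, S, by rw [heq]; simp, ?_, ?_⟩
        · intro x hx
          rcases List.mem_cons.mp hx with rfl | hx
          · omega
          · exact hP x hx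
        · intro x hx
          rcases List.mem_cons.mp hx with rfl | hx
          · omega
          · exact hall x (heq ▸ hx)

theorem foldl_keep (f : Int → Int) (m : Int) (S : List Int) (hS : ∀ x ∈ S, f x ≤ f m) :
    S.foldl (fun b k => if f k > f b then k else b) m = m := by
  induction S with
  | nil => rfl
  | cons x t ih =>
    simp only [List.foldl_cons]
    rw [if_neg (by have := hS x (by simp); omega)]
    exact ih (fun y hy => hS y (by simp [hy]))

theorem foldl_sel (f : Int → Int) (P : List Int) (m : Int) (S : List Int) (b : Int)
    (hP : ∀ x ∈ P, f x < f m) (hb : f b < f m) (hS : ∀ x ∈ S, f x ≤ f m) :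
    (P ++ m :: S).foldl (fun b k => if f k > f b then k else b) b = m := by
  induction P generalizing b with
  | nil =>
    simp only [List.nil_append, List.foldl_cons]
    rw [if_pos hb]
    exact foldl_keep f m S hS
  | cons q P' ih =>
    simp only [List.cons_append, List.foldl_cons]
    split_ifs with h
    · exact ih q (fun x hx => hP x (by simp [hx])) (hP q (by simp))
    · exact ih b (fun x hx => hP x (by simp [hx])) hb

theorem map_pyGetD_range (rem : List Int) (a b : Nat) (hab : a ≤ b) (hb : b ≤ rem.length) :
    (PySem.List.pyRange (a : Int) (b : Int) 1).map (fun k => PySem.List.pyGetD rem k 0)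
      = (rem.drop a).take (b - a) := by
  rw [PySem.List.pyRange_one, List.map_map]
  have hcast : ((b : Int) - (a : Int)).toNat = b - a := by omega
  rw [hcast]
  apply List.ext_getElem
  · simp; omega
  · intro i h1 h2
    simp only [List.getElem_map, List.getElem_range, Function.comp_apply]
    have hc2 : ((a : Int) + (i : Int)) = ((a + i : Nat) : Int) := by push_cast; ring
    have hilt : i < b - a := by simpa using h1
    have hlt : a + i < rem.length := by omega
    rw [hc2, PySem.List.pyGetD_natCast, List.getD_eq_getElem rem 0 hlt,
      List.getElem_take, List.getElem_drop]

theorem map_g_order (rem : List Int) (c : Nat) (hc : c ≤ rem.length) :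
    (PySem.List.pyRange (c : Int) (rem.length : Int) 1 ++ PySem.List.pyRange 0 (c : Int) 1).map
        (fun k => PySem.List.pyGetD rem k 0)
      = rem.drop c ++ rem.take c := by
  have h2 := map_pyGetD_range rem 0 c (by omega) hc
  simp only [Nat.cast_zero, Nat.sub_zero, List.drop_zero] at h2
  rw [List.map_append, map_pyGetD_range rem c rem.length hc le_rfl, h2]
  congr 1
  exact List.take_of_length_le (by simp)

theorem rot_take_drop (rem : List Int) (c j k : Nat) (hc : c ≤ rem.length) (hj : j < rem.length)
    (hk : k = if j < rem.length - c then c + j else j - (rem.length - c)) :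
    (rem.drop c ++ rem.take c).drop (j + 1) ++ (rem.drop c ++ rem.take c).take j
      = rem.drop (k + 1) ++ rem.take k := by
  have hlen : (rem.drop c).length = rem.length - c := by simp
  split_ifs at hk with hcase
  · -- k = c + j, j < length - c
    subst hk
    rw [List.drop_append, List.take_append, hlen]
    rw [show (j + 1 - (rem.length - c)) = 0 by omega, List.drop_zero]
    rw [show (j - (rem.length - c)) = 0 by omega, List.take_zero, List.append_nil]
    rw [List.drop_drop]
    rw [List.take_add]
    rw [List.append_assoc]
    rw [show (c + (j + 1)) = c + j + 1 by omega]
  · -- k = j - (length - c), wrapped into the take part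
    subst hk
    have hkc : j - (rem.length - c) < c := by omega
    rw [List.drop_append, List.take_append, hlen]
    rw [List.drop_eq_nil_of_le (by omega : (rem.drop c).length ≤ j + 1), List.nil_append]
    rw [List.take_of_length_le (by omega : (rem.drop c).length ≤ j)]
    rw [show (j + 1 - (rem.length - c)) = j - (rem.length - c) + 1 by omega]
    rw [show ((rem.take c).take (j - (rem.length - c))) = rem.take (j - (rem.length - c)) by
      rw [List.take_take]; congr 1; omega]
    have hsplit : rem.drop (j - (rem.length - c) + 1)
        = (rem.take c).drop (j - (rem.length - c) + 1) ++ rem.drop c := by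
      set K := j - (rem.length - c) + 1 with hK
      have hKc : K ≤ c := by omega
      have h1 : rem.drop K = (rem.take c ++ rem.drop c).drop K := by
        rw [List.take_append_drop]
      rw [h1, List.drop_append]
      congr 1
      rw [show ((rem.take c).length) = c from by simp [List.length_take]; omega]
      rw [show (K - c) = 0 from by omega, List.drop_zero]
    rw [hsplit, List.append_assoc]

theorem erase_rot (rem : List Int) (k : Nat) (hk : k < rem.length) (c' : Nat)
    (hc' : c' = if k < rem.length - 1 then k else 0) :
    (rem.eraseIdx k).drop c' ++ (rem.eraseIdx k).take c' = rem.drop (k + 1) ++ rem.take k := by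
  have htl : (rem.take k).length = k := by simp [List.length_take]; omega
  split_ifs at hc' with hcase
  · rw [hc']
    rw [List.eraseIdx_eq_take_drop_succ, List.drop_append, List.take_append, htl]
    rw [List.drop_eq_nil_of_le (by omega : (rem.take k).length ≤ k), List.nil_append]
    rw [show (k - k) = 0 by omega, List.drop_zero, List.take_zero, List.append_nil]
    rw [List.take_of_length_le (by omega : (rem.take k).length ≤ k)]
  · rw [hc']
    have hkl : k = rem.length - 1 := by omega
    rw [List.eraseIdx_eq_take_drop_succ]
    rw [List.drop_zero, List.take_zero, List.append_nil]
    rw [List.drop_eq_nil_of_le (by omega : rem.length ≤ k + 1)]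
    simp

theorem solutionLoop_nil (location ans : Int) : solutionLoop location [] ans = ans := by
  rw [solutionLoop.eq_def]

theorem solutionAltLoop_nil (priorities : List Int) (location cur ans : Int) :
    solutionAltLoop priorities location [] cur ans = ans := by
  rw [solutionAltLoop.eq_def]

-- collapsing A's element-by-element rotations: the first document with no strictly
-- greater priority behind it is printed, and the deque resumes right after it
theorem loopA_split (location : Int) (U : List (Int × Int)) (m : Int × Int)
    (V : List (Int × Int)) (ans : Int)
    (hU : ∀ x ∈ U, x.1 < m.1) (hV : ∀ x ∈ V, x.1 ≤ m.1) :
    solutionLoop location (U ++ m :: V) ans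
      = if m.2 = location then ans + 1 else solutionLoop location (V ++ U) (ans + 1) := by
  induction U generalizing V with
  | nil =>
    simp only [List.nil_append, List.append_nil]
    cases V with
    | nil =>
      rw [solutionLoop.eq_def]
    | cons r rs =>
      have hcond : ¬ (pyMaxPair r rs).1 > m.1 := by
        rw [fst_pyMaxPair_eq_maxFst]
        obtain ⟨x, hx, hxe⟩ := exists_fst_eq_maxFst (r :: rs) (by simp)
        have := hV x hx
        omega
      rw [solutionLoop.eq_def]
      simp [hcond]
  | cons d U' ih =>
    obtain ⟨r, rs, hshape⟩ : ∃ r rs, U' ++ m :: V = r :: rs := by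
      cases U' with
      | nil => exact ⟨m, V, by simp⟩
      | cons a b => exact ⟨a, b ++ m :: V, by simp⟩
    have hgt : (pyMaxPair r rs).1 > d.1 := by
      rw [fst_pyMaxPair_eq_maxFst, ← hshape]
      have h1 : m.1 ≤ maxFst (U' ++ m :: V) := le_maxFst _ m (by simp)
      have h2 : d.1 < m.1 := hU d (by simp)
      omega
    rw [List.cons_append, hshape, solutionLoop.eq_def]
    simp only [hgt, if_pos]
    rw [← hshape]
    have hstep : (U' ++ m :: V) ++ [d] = U' ++ m :: (V ++ [d]) := by simp
    rw [hstep]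
    rw [ih (V ++ [d]) (fun x hx => hU x (by simp [hx])) (fun x hx => by
      rcases List.mem_append.mp hx with hx | hx
      · exact hV x hx
      · have hxd : x = d := by simpa using hx
        subst hxd
        exact le_of_lt (hU x (by simp)))]
    have hfin : (V ++ [d]) ++ U' = V ++ d :: U' := by simp
    rw [hfin]

-- one full print step of B's loop
theorem altLoop_step (priorities : List Int) (location : Int) (rem : List Int) (cur ans : Int)
    (o0 : Int) (orest : List Int)
    (ho : PySem.List.pyRange cur (rem.length : Int) 1 ++ PySem.List.pyRange 0 cur 1
      = o0 :: orest)
    (k : Nat) (hklt : k < rem.length)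
    (hbest : altBestFold priorities rem o0 orest = (k : Int)) :
    solutionAltLoop priorities location rem cur ans =
      if rem[k] = location then ans + 1
      else solutionAltLoop priorities location (rem.eraseIdx k)
        (if (k : Int) < ((rem.eraseIdx k).length : Int) then (k : Int) else 0) (ans + 1) := by
  have hne : rem ≠ [] := by intro h; subst h; simp at hklt
  obtain ⟨hd, tl, rfl⟩ := List.exists_cons_of_ne_nil hne
  have hget : PySem.List.pyGet? (hd :: tl) ((k : Int)) = some ((hd :: tl)[k]) := by
    rw [PySem.List.pyGet?_natCast, List.getElem?_eq_getElem hklt]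
  have hnn : ¬ ((k : Int) < 0) := by omega
  rw [solutionAltLoop.eq_def]
  simp only [ho]
  split
  · rename_i hgnone
    rw [hbest, hget] at hgnone
    exact absurd hgnone (by simp)
  · rename_i doc hgsome
    rw [hbest, hget] at hgsome
    injection hgsome with hdoc
    subst hdoc
    simp only [hbest, hnn, if_false, Int.toNat_natCast]

theorem loop_agree (priorities : List Int) (location : Int) :
    ∀ (N : Nat) (rem : List Int), rem.length ≤ N → ∀ (c : Nat) (ans : Int), c ≤ rem.length →
      (∀ i ∈ rem, 0 ≤ i ∧ i < (priorities.length : Int)) →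
      solutionLoop location
          ((rem.drop c ++ rem.take c).map (fun i => (PySem.List.pyGetD priorities i 0, i))) ans
        = solutionAltLoop priorities location rem (c : Int) ans := by
  intro N
  induction N with
  | zero =>
    intro rem hlen c ans hc hmem
    have h0 : rem = [] := by cases rem with | nil => rfl | cons a b => simp at hlen
    subst h0
    simp only [List.drop_nil, List.take_nil, List.append_nil, List.map_nil]
    rw [solutionLoop_nil, solutionAltLoop_nil]
  | succ N ih =>
    intro rem hlen c ans hc hmem
    by_cases hrem : rem = []
    · subst hrem
      simp only [List.drop_nil, List.take_nil, List.append_nil, List.map_nil]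
      rw [solutionLoop_nil, solutionAltLoop_nil]
    · have hnpos : 0 < rem.length := List.length_pos_of_ne_nil hrem
      have hordlen : (PySem.List.pyRange (c : Int) (rem.length : Int) 1
          ++ PySem.List.pyRange 0 (c : Int) 1).length = rem.length := by
        simp only [List.length_append, PySem.List.length_pyRange_one]
        omega
      have hordne : PySem.List.pyRange (c : Int) (rem.length : Int) 1
          ++ PySem.List.pyRange 0 (c : Int) 1 ≠ [] := by
        intro hcon
        rw [hcon] at hordlen
        simp at hordlen
        omega
      obtain ⟨o0, orest, ho⟩ := List.exists_cons_of_ne_nil hordne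
      obtain ⟨P, kst, S, hPS, hPlt, hall⟩ :=
        exists_first_max_split (keyf priorities rem) _ hordne
      have hjlt : P.length < rem.length := by
        have hl := congrArg List.length hPS
        rw [hordlen] at hl
        simp at hl
        omega
      set j := P.length with hjdef
      set kk : Nat := (if j < rem.length - c then c + j else j - (rem.length - c)) with hkkdef
      have hkkn : kk < rem.length := by rw [hkkdef]; split <;> omega
      have hjord : j < (PySem.List.pyRange (c : Int) (rem.length : Int) 1
          ++ PySem.List.pyRange 0 (c : Int) 1).length := by rw [hordlen]; exact hjlt
      have hv : (PySem.List.pyRange (c : Int) (rem.length : Int) 1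
          ++ PySem.List.pyRange 0 (c : Int) 1)[j]'hjord = (kk : Int) := by
        have htn : (((rem.length : Int)) - (c : Int)).toNat = rem.length - c := by omega
        rw [List.getElem_append]
        split
        · rw [PySem.List.getElem_pyRange_one]
          rw [hkkdef]
          rename_i hcase
          rw [PySem.List.length_pyRange_one, htn] at hcase
          rw [if_pos hcase]
          push_cast
          ring
        · rw [PySem.List.getElem_pyRange_one]
          rename_i hcase
          rw [PySem.List.length_pyRange_one, htn] at hcase
          rw [hkkdef, if_neg hcase]
          rw [PySem.List.length_pyRange_one, htn]
          omega
      have hkst : kst = (kk : Int) := by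
        have h1 : (P ++ kst :: S)[j]'(by
            rw [show ((P ++ kst :: S).length) = (PySem.List.pyRange (c : Int) (rem.length : Int) 1
              ++ PySem.List.pyRange 0 (c : Int) 1).length from by rw [hPS]]
            exact hjord) = kst := by
          rw [List.getElem_append_right (le_refl j)]
          simp only [hjdef, Nat.sub_self, List.getElem_cons_zero]
        rw [← h1, ← hv]
        exact (List.getElem_of_eq hPS.symm _)
      have hbest : altBestFold priorities rem o0 orest = (kk : Int) := by
        rw [← hkst, altBestFold_eq]
        have hoPS : o0 :: orest = P ++ kst :: S := by rw [← ho, hPS]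
        cases P with
        | nil =>
          have h1 : o0 = kst ∧ orest = S := by simpa using hoPS
          rw [h1.1, h1.2]
          exact foldl_keep _ kst S (fun x hx => hall x (by rw [hPS]; simp [hx]))
        | cons p0 P' =>
          have h1 : o0 = p0 ∧ orest = P' ++ kst :: S := by simpa using hoPS
          rw [h1.1, h1.2]
          exact foldl_sel (keyf priorities rem) P' kst S p0
            (fun x hx => hPlt x (by simp [hx]))
            (hPlt p0 (by simp))
            (fun x hx => hall x (by rw [hPS]; simp [hx]))
      have hrot : rem.drop c ++ rem.take c
          = P.map (fun k => PySem.List.pyGetD rem k 0)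
            ++ PySem.List.pyGetD rem kst 0 :: S.map (fun k => PySem.List.pyGetD rem k 0) := by
        rw [← map_g_order rem c hc, hPS, List.map_append, List.map_cons]
      have hdocv : PySem.List.pyGetD rem kst 0 = rem[kk]'hkkn := by
        rw [hkst, PySem.List.pyGetD_natCast, List.getD_eq_getElem rem 0 hkkn]
      have hgl : (P.map (fun k => PySem.List.pyGetD rem k 0)).length = j := by
        simp [hjdef]
      rw [hrot, List.map_append, List.map_cons]
      have hU : ∀ x ∈ (P.map (fun k => PySem.List.pyGetD rem k 0)).map
          (fun i => (PySem.List.pyGetD priorities i 0, i)),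
          x.1 < ((PySem.List.pyGetD priorities (PySem.List.pyGetD rem kst 0) 0,
            PySem.List.pyGetD rem kst 0) : Int × Int).1 := by
        intro x hx
        simp only [List.map_map, List.mem_map, Function.comp_apply] at hx
        obtain ⟨p, hp, rfl⟩ := hx
        exact hPlt p hp
      have hV : ∀ x ∈ (S.map (fun k => PySem.List.pyGetD rem k 0)).map
          (fun i => (PySem.List.pyGetD priorities i 0, i)),
          x.1 ≤ ((PySem.List.pyGetD priorities (PySem.List.pyGetD rem kst 0) 0,
            PySem.List.pyGetD rem kst 0) : Int × Int).1 := by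
        intro x hx
        simp only [List.map_map, List.mem_map, Function.comp_apply] at hx
        obtain ⟨p, hp, rfl⟩ := hx
        exact hall p (by rw [hPS]; simp [hp])
      rw [loopA_split location _ _ _ ans hU hV]
      rw [altLoop_step priorities location rem (c : Int) ans o0 orest ho kk hkkn hbest]
      simp only [hdocv]
      by_cases hloc : rem[kk]'hkkn = location
      · rw [if_pos hloc, if_pos hloc]
      · rw [if_neg hloc, if_neg hloc]
        rw [← List.map_append]
        have hA : (rem.drop c ++ rem.take c).take j
            = P.map (fun k => PySem.List.pyGetD rem k 0) := by
          rw [hrot, ← hgl, List.take_left]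
        have hB : (rem.drop c ++ rem.take c).drop (j + 1)
            = S.map (fun k => PySem.List.pyGetD rem k 0) := by
          rw [hrot, List.drop_append]
          rw [List.drop_eq_nil_of_le (by rw [hgl]; omega), List.nil_append]
          rw [hgl, show (j + 1 - j) = 1 from by omega]
          simp
        have hSP : S.map (fun k => PySem.List.pyGetD rem k 0)
            ++ P.map (fun k => PySem.List.pyGetD rem k 0)
            = rem.drop (kk + 1) ++ rem.take kk := by
          rw [← hA, ← hB]
          exact rot_take_drop rem c j kk hc hjlt hkkdef
        rw [hSP]
        set c' : Nat := (if kk < rem.length - 1 then kk else 0) with hc'def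
        rw [(erase_rot rem kk hkkn c' hc'def).symm]
        have hlen' : (rem.eraseIdx kk).length = rem.length - 1 := by
          rw [List.length_eraseIdx, if_pos hkkn]
        have hcur : (if (kk : Int) < ((rem.eraseIdx kk).length : Int) then (kk : Int) else 0)
            = ((c' : Nat) : Int) := by
          rw [hlen', hc'def]
          rcases lt_or_ge kk (rem.length - 1) with h | h
          · rw [if_pos (by exact_mod_cast h), if_pos h]
          · rw [if_neg (by exact_mod_cast not_lt.mpr h), if_neg (by omega)]
            simp
        rw [hcur]
        exact ih (rem.eraseIdx kk) (by omega) c' (ans + 1)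
          (by rw [hlen', hc'def]; split <;> omega)
          (fun i hi => hmem i ((List.eraseIdx_sublist rem kk).subset hi))

theorem init_deque (priorities : List Int) :
    (PySem.List.enumerate priorities).map (fun ip => (ip.2, ip.1))
      = (PySem.List.pyRange 0 (priorities.length : Int) 1).map
          (fun i => (PySem.List.pyGetD priorities i 0, i)) := by
  rw [PySem.List.enumerate_eq_map_pyRange priorities 0, List.map_map]
  rfl

-- ===== VERDICT (by name: the statement is the Claim_ definition above) =====
theorem solution_spec : Claim_equal_solution := by
  unfold Claim_equal_solution
  intro priorities location _
  unfold Spec_solution solution solution_alt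
  have hlenr : (PySem.List.pyRange 0 (priorities.length : Int) 1).length
      = priorities.length := by
    rw [PySem.List.length_pyRange_one]
    omega
  have hmem : ∀ i ∈ PySem.List.pyRange 0 (priorities.length : Int) 1,
      0 ≤ i ∧ i < (priorities.length : Int) := by
    intro i hi
    rw [PySem.List.mem_pyRange_one] at hi
    exact hi
  have h := loop_agree priorities location priorities.length
    (PySem.List.pyRange 0 (priorities.length : Int) 1) (by omega) 0 0 (by omega) hmem
  simp only [List.drop_zero, List.take_zero, List.append_nil, Nat.cast_zero] at h
  simp only [init_deque priorities]
  exact h
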